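-- pv_equiv track=rewrite | github.com/jsn-lps/md_table_sorter | main.py | get_col_head
-- ===== SOURCE A (Python) =====
-- table_delim = "|"
--
-- def get_col_head(content: list) -> object:
--     col = []
--     at_table = False
--     col_line = 0  # line based on 0 index
--
--     for line in content:
--         if at_table is True and line.startswith(table_delim):
--             col_line += 1
--             continue
--         elif at_table is True and not line.startswith(table_delim):
--             at_table = False
--
--         if line.startswith(table_delim) and at_table is False:
--             head = line.lstrip(table_delim).rstrip("\n").rstrip(table_delim)
--             col.append({col_line: head.split(table_delim)})
--             at_table = True
--         col_line += 1
--
--     return col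
-- ===== SOURCE B (Python) =====
-- table_delim = "|"
--
-- def _parse(line):
--     head = line.lstrip(table_delim).rstrip("\n").rstrip(table_delim)
--     return head.split(table_delim)
--
-- def get_col_head(content: list) -> object:
--     # Stateless relational formulation: pair every line with its predecessor
--     # (shift-and-zip), then one comprehension keeps exactly the lines that
--     # start a table run (line starts with '|', predecessor does not).
--     pairs = zip(content, [""] + content)
--     return [{i: _parse(line)}
--             for i, (line, prev) in enumerate(pairs)
--             if line.startswith(table_delim) and not prev.startswith(table_delim)]
-- ===== Notes on version B (the rewrite author's own statement) =====
-- stated objective: alternative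
-- what changed: Replaced the stateful at_table-flag scan with a stateless shift-and-zip formulation: pair each line with its predecessor and keep via one comprehension exactly the lines that start with '|' while their predecessor does not.
import Mathlib
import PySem

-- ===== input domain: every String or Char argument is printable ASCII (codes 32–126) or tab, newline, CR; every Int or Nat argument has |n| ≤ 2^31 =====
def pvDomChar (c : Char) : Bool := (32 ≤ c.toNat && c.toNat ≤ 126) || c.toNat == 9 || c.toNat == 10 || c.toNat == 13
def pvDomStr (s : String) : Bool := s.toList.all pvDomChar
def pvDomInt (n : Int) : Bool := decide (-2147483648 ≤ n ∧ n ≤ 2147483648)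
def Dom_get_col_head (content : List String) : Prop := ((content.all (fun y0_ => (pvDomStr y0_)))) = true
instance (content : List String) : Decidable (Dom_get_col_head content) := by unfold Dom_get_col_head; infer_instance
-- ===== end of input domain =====

-- B replaces A's at_table-flag scan with a stateless shift-and-zip pass (pair each line with its predecessor, filter, map); same cost, different decomposition.

-- ===== PORT A =====
-- line.lstrip("|"): drop all leading '|' (exact: single-char strip set)
def pvLstripDelim (cs : List Char) : List Char := cs.dropWhile (· == '|')
-- s.rstrip(c): drop all trailing copies of the single char c (exact)
def pvRstrip1 (c : Char) (cs : List Char) : List Char := (cs.reverse.dropWhile (· == c)).reverse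
-- head = line.lstrip("|").rstrip("\n").rstrip("|"); head.split("|")
def pvParseHead (line : String) : List String :=
  (PySem.Chars.splitOn (pvRstrip1 '|' (pvRstrip1 '\n' (pvLstripDelim line.toList))) ['|']).map String.ofList

def pvStepA (s : List (List (Int × List String)) × Bool × Int) (line : String) :
    List (List (Int × List String)) × Bool × Int :=
  let col := s.1
  let at_table := s.2.1
  let col_line := s.2.2
  if at_table && PySem.Str.startswith line "|" then
    (col, at_table, col_line + 1)
  else if PySem.Str.startswith line "|" then
    (col ++ [[(col_line, pvParseHead line)]], true, col_line + 1)
  else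
    (col, false, col_line + 1)

def get_col_head (content : List String) : List (List (Int × List String)) :=
  (content.foldl pvStepA ([], false, 0)).1

-- ===== PORT B =====
-- pairs = zip(content, [""] + content); comprehension over enumerate(pairs)
def get_col_head_alt (content : List String) : List (List (Int × List String)) :=
  let pairs := content.zip ("" :: content)
  ((PySem.List.enumerate pairs 0).filter
      (fun q => PySem.Str.startswith q.2.1 "|" && !PySem.Str.startswith q.2.2 "|")).map
    (fun q => [(q.1, pvParseHead q.2.1)])

-- ===== PRECONDITION & SPEC =====
def Spec_get_col_head (content : List String) (out : List (List (Int × List String))) : Prop := out = get_col_head_alt content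
instance (content : List String) (out : List (List (Int × List String))) : Decidable (Spec_get_col_head content out) := by unfold Spec_get_col_head; infer_instance

-- ===== CLAIM =====
def Claim_equal_get_col_head : Prop := ∀ (content : List String), Dom_get_col_head content → Spec_get_col_head content (get_col_head content)

-- ===== LEMMAS AND PROOFS =====
-- intermediate reading of A's fold: the at_table flag equals "previous line starts with '|'"
def pvGoA (prev : Bool) (i : Int) : List String → List (List (Int × List String))
  | [] => []
  | l :: rest =>
    (if PySem.Str.startswith l "|" && !prev then [[(i, pvParseHead l)]] else [])
      ++ pvGoA (PySem.Str.startswith l "|") (i + 1) rest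

theorem pv_fold_goA (ls : List String) :
    ∀ (acc : List (List (Int × List String))) (b : Bool) (i : Int),
      (ls.foldl pvStepA (acc, b, i)).1 = acc ++ pvGoA b i ls := by
  induction ls with
  | nil => intro acc b i; simp [pvGoA]
  | cons l rest ih =>
    intro acc b i
    by_cases h : PySem.Chars.startswith l.toList ['|'] = true <;> cases b <;>
      simp [List.foldl, pvStepA, pvGoA, PySem.Str.startswith, h, ih]

theorem pv_goA_zip (ls : List String) :
    ∀ (p : String) (i : Int),
      pvGoA (PySem.Str.startswith p "|") i ls =
        ((PySem.List.enumerate (ls.zip (p :: ls)) i).filter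
            (fun q => PySem.Str.startswith q.2.1 "|" && !PySem.Str.startswith q.2.2 "|")).map
          (fun q => [(q.1, pvParseHead q.2.1)]) := by
  induction ls with
  | nil => intro p i; simp [pvGoA, PySem.List.enumerate_nil]
  | cons l rest ih =>
    intro p i
    have IH := ih l (i + 1)
    by_cases h : PySem.Chars.startswith l.toList ['|'] = true <;>
      by_cases hp : PySem.Chars.startswith p.toList ['|'] = true <;>
        (simp only [PySem.Str.startswith, show ("|" : String).toList = ['|'] from rfl, h] at IH;
         simp [pvGoA, List.zip, PySem.List.enumerate_cons,
               PySem.Str.startswith, h, hp, IH])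

-- ===== VERDICT =====
theorem get_col_head_spec : Claim_equal_get_col_head := by
  intro content _
  unfold Spec_get_col_head get_col_head get_col_head_alt
  have hp : PySem.Str.startswith "" "|" = false := by decide
  have := pv_goA_zip content "" 0
  rw [hp] at this
  simpa [pv_fold_goA content [] false 0] using this
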